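-- pv_equiv track=rewrite | github.com/DavidivoWang/tonesoul-mirrortone | tonesoul/autonomous_schedule.py | _derive_llm_backoff_mode
-- ===== SOURCE A (Python) =====
-- from typing import Any, Callable, Optional, Protocol, Sequence
--
-- def _derive_llm_backoff_mode(llm_breach_reasons: Sequence[str]) -> str:
--     reasons = [str(item).strip() for item in llm_breach_reasons if str(item).strip()]
--     has_timeout = any("llm_preflight_timeout_count>" in item for item in reasons)
--     has_probe = any("llm_probe_latency_ms>" in item for item in reasons)
--     has_selection = any("llm_selection_latency_ms>" in item for item in reasons)
--     has_total = any("llm_preflight_latency_ms>" in item for item in reasons)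
--     if (has_probe or has_timeout) and has_selection:
--         return "mixed_latency"
--     if has_timeout or has_probe:
--         return "probe_latency"
--     if has_selection:
--         return "selection_latency"
--     if has_total:
--         return "preflight_latency"
--     return "llm_budget"
-- ===== SOURCE B (Python) =====
-- # Bitmask + decision-table formulation: one pass ORs marker bits into a mask,
-- # and a precomputed 16-entry table maps the mask directly to the mode (no branch cascade).
-- _BACKOFF_TABLE = [
--     "llm_budget",        "probe_latency", "probe_latency", "probe_latency",
--     "selection_latency", "mixed_latency", "mixed_latency", "mixed_latency",
--     "preflight_latency", "probe_latency", "probe_latency", "probe_latency",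
--     "selection_latency", "mixed_latency", "mixed_latency", "mixed_latency",
-- ]
--
-- def _derive_llm_backoff_mode(llm_breach_reasons):
--     mask = 0
--     for item in llm_breach_reasons:
--         text = str(item).strip()
--         if "llm_preflight_timeout_count>" in text:
--             mask |= 1
--         if "llm_probe_latency_ms>" in text:
--             mask |= 2
--         if "llm_selection_latency_ms>" in text:
--             mask |= 4
--         if "llm_preflight_latency_ms>" in text:
--             mask |= 8
--     return _BACKOFF_TABLE[mask]
-- ===== Notes on version B (the rewrite author's own statement) =====
-- stated objective: alternative
-- what changed: B replaces A's cleaned-list construction, four separate any() scans and the priority if-cascade by a single pass that ORs per-marker bits into a 4-bit mask and a direct lookup in a precomputed 16-entry decision table indexed by the mask.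
import Mathlib
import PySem

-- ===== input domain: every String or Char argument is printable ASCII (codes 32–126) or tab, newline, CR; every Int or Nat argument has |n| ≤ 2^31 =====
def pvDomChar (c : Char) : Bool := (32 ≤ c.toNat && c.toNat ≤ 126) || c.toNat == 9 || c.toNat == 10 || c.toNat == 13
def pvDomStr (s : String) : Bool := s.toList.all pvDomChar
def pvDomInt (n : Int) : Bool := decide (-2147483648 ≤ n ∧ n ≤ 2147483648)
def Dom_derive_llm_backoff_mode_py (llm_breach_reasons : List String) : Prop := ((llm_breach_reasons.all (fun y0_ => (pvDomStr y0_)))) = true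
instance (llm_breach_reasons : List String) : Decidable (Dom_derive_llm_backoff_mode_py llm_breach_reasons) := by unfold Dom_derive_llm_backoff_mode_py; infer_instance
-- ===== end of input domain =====

-- B replaces A's cleaned-list + four any() scans + if-cascade by a single pass ORing
-- marker bits into a 4-bit mask and a 16-entry decision-table lookup (alternative
-- decomposition; same asymptotic cost).


-- ===== PORT A =====
def derive_llm_backoff_mode_py (llm_breach_reasons : List String) : String :=
  let reasons := llm_breach_reasons.filterMap (fun item =>
    let t := PySem.Str.strip item
    if t = "" then none else some t)
  let has_timeout := reasons.any (fun item => PySem.Str.isIn "llm_preflight_timeout_count>" item)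
  let has_probe := reasons.any (fun item => PySem.Str.isIn "llm_probe_latency_ms>" item)
  let has_selection := reasons.any (fun item => PySem.Str.isIn "llm_selection_latency_ms>" item)
  let has_total := reasons.any (fun item => PySem.Str.isIn "llm_preflight_latency_ms>" item)
  if (has_probe || has_timeout) && has_selection then "mixed_latency"
  else if has_timeout || has_probe then "probe_latency"
  else if has_selection then "selection_latency"
  else if has_total then "preflight_latency"
  else "llm_budget"

-- ===== PORT B =====
def pvBackoffTable : List String :=
  ["llm_budget",        "probe_latency", "probe_latency", "probe_latency",
   "selection_latency", "mixed_latency", "mixed_latency", "mixed_latency",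
   "preflight_latency", "probe_latency", "probe_latency", "probe_latency",
   "selection_latency", "mixed_latency", "mixed_latency", "mixed_latency"]

def pvMaskStep (mask : Nat) (item : String) : Nat :=
  let text := PySem.Str.strip item
  let mask := if PySem.Str.isIn "llm_preflight_timeout_count>" text then mask ||| 1 else mask
  let mask := if PySem.Str.isIn "llm_probe_latency_ms>" text then mask ||| 2 else mask
  let mask := if PySem.Str.isIn "llm_selection_latency_ms>" text then mask ||| 4 else mask
  let mask := if PySem.Str.isIn "llm_preflight_latency_ms>" text then mask ||| 8 else mask
  mask

def derive_llm_backoff_mode_py_alt (llm_breach_reasons : List String) : String :=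
  let mask := llm_breach_reasons.foldl pvMaskStep 0
  -- Python list indexing _BACKOFF_TABLE[mask]; mask < 16 always holds, so getD is exact
  pvBackoffTable.getD mask "llm_budget"

-- ===== PRECONDITION & SPEC =====
def Spec_derive_llm_backoff_mode_py (llm_breach_reasons : List String) (out : String) : Prop := out = derive_llm_backoff_mode_py_alt llm_breach_reasons
instance (llm_breach_reasons : List String) (out : String) : Decidable (Spec_derive_llm_backoff_mode_py llm_breach_reasons out) := by unfold Spec_derive_llm_backoff_mode_py; infer_instance

-- ===== CLAIM (what is proved, stated in full; the proofs are below) =====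
def Claim_equal_derive_llm_backoff_mode_py : Prop := ∀ (llm_breach_reasons : List String), Dom_derive_llm_backoff_mode_py llm_breach_reasons → Spec_derive_llm_backoff_mode_py llm_breach_reasons (derive_llm_backoff_mode_py llm_breach_reasons)

-- ===== LEMMAS AND PROOFS =====

-- the 4-bit mask corresponding to the four flags (proof-only helper)
def pvBitmask (t p s tot : Bool) : Nat :=
  (cond t 1 0) ||| (cond p 2 0) ||| (cond s 4 0) ||| (cond tot 8 0)

theorem bitmask_or (a b c d a' b' c' d' : Bool) :
    pvBitmask a b c d ||| pvBitmask a' b' c' d' =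
    pvBitmask (a || a') (b || b') (c || c') (d || d') := by
  cases a <;> cases b <;> cases c <;> cases d <;>
    cases a' <;> cases b' <;> cases c' <;> cases d' <;> rfl

theorem chain_eq (m : Nat) (a b c d : Bool) :
    (let m1 := if a then m ||| 1 else m
     let m2 := if b then m1 ||| 2 else m1
     let m3 := if c then m2 ||| 4 else m2
     if d then m3 ||| 8 else m3) = m ||| pvBitmask a b c d := by
  cases a <;> cases b <;> cases c <;> cases d <;> simp [pvBitmask, Nat.or_assoc]

theorem maskStep_eq (m : Nat) (item : String) :
    pvMaskStep m item = m |||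
      pvBitmask (PySem.Str.isIn "llm_preflight_timeout_count>" (PySem.Str.strip item))
                (PySem.Str.isIn "llm_probe_latency_ms>" (PySem.Str.strip item))
                (PySem.Str.isIn "llm_selection_latency_ms>" (PySem.Str.strip item))
                (PySem.Str.isIn "llm_preflight_latency_ms>" (PySem.Str.strip item)) :=
  chain_eq m _ _ _ _

theorem foldl_mask (rs : List String) : ∀ (m : Nat),
    rs.foldl pvMaskStep m = m |||
      pvBitmask (rs.any (fun x => PySem.Str.isIn "llm_preflight_timeout_count>" (PySem.Str.strip x)))
                (rs.any (fun x => PySem.Str.isIn "llm_probe_latency_ms>" (PySem.Str.strip x)))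
                (rs.any (fun x => PySem.Str.isIn "llm_selection_latency_ms>" (PySem.Str.strip x)))
                (rs.any (fun x => PySem.Str.isIn "llm_preflight_latency_ms>" (PySem.Str.strip x))) := by
  induction rs with
  | nil => intro m; simp [pvBitmask]
  | cons x xs ih =>
    intro m
    rw [List.foldl_cons, ih, maskStep_eq, Nat.or_assoc, bitmask_or]
    simp [List.any_cons]

-- A's any over the cleaned list = any of the marker over the stripped raw items
-- (an empty stripped string contains no nonempty marker)
theorem anyA_eq (rs : List String) (m : String) (hm : PySem.Str.isIn m "" = false) :
    (rs.filterMap (fun item =>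
        let t := PySem.Str.strip item
        if t = "" then none else some t)).any
      (fun item => PySem.Str.isIn m item) =
    rs.any (fun x => PySem.Str.isIn m (PySem.Str.strip x)) := by
  rw [List.any_filterMap]
  refine congrArg rs.any (funext fun a => ?_)
  by_cases h : PySem.Str.strip a = ""
  · simp only [h]
    simpa using hm
  · simp [h]

-- ===== VERDICT (by name: the statement is the Claim_ definition above) =====
theorem derive_llm_backoff_mode_py_spec : Claim_equal_derive_llm_backoff_mode_py := by
  intro rs _
  simp only [Spec_derive_llm_backoff_mode_py, derive_llm_backoff_mode_py,
    derive_llm_backoff_mode_py_alt]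
  rw [anyA_eq rs "llm_preflight_timeout_count>" (by decide),
      anyA_eq rs "llm_probe_latency_ms>" (by decide),
      anyA_eq rs "llm_selection_latency_ms>" (by decide),
      anyA_eq rs "llm_preflight_latency_ms>" (by decide),
      foldl_mask rs 0, Nat.zero_or]
  cases rs.any (fun x => PySem.Str.isIn "llm_preflight_timeout_count>" (PySem.Str.strip x)) <;>
  cases rs.any (fun x => PySem.Str.isIn "llm_probe_latency_ms>" (PySem.Str.strip x)) <;>
  cases rs.any (fun x => PySem.Str.isIn "llm_selection_latency_ms>" (PySem.Str.strip x)) <;>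
  cases rs.any (fun x => PySem.Str.isIn "llm_preflight_latency_ms>" (PySem.Str.strip x)) <;> rfl
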